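-- pv_equiv track=rewrite | github.com/samitha278/UoM-Labs | Programming Assignment 2/uom 2018 pp2/uom 2018 pp2 12/uom 2018 pp2 12.py | get_number_of_primes
-- ===== SOURCE A (Python) =====
-- def get_number_of_primes(N):
--
--     grid = [[0]*(N+1) for i in range(N+1)]
--
--
--     count = 0
--     for i in range(1,N+1):
--         for j in range(1,N+1):
--             grid[i][j] = val = gcd(i,j)
--
--             if isPrime(val):
--                 count+=1
--
--     return count
--
-- def gcd(i,j):
--     ifac = [k for k in range(1,i+1) if i%k==0]
--     jfac = [k for k in range(1,j+1) if j%k==0]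
--
--     diff = list(set(ifac).intersection(set(jfac)))
--
--     return max(diff)
--
-- def isPrime(n):
--
--     if n<=7:
--         return n==2 or n==3 or n==5 or n==7
--
--     if n%2==0 or n%3==0 or n%5==0 or n%7==0:
--         return False
--
--     for i in range(11,int(n**0.5)+1):
--         if n%i==0:
--             return False
--
--     return True
-- ===== SOURCE B (Python) =====
-- def get_number_of_primes(N):
--     if N < 1:
--         return 0
--     prime = [_is_prime(v) for v in range(N + 1)]
--     count = 0
--     for i in range(1, N + 1):
--         for j in range(1, N + 1):
--             if prime[_gcd(i, j)]:
--                 count += 1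
--     return count
--
--
-- def _gcd(a, b):
--     while b:
--         a, b = b, a % b
--     return a
--
--
-- def _is_prime(n):
--     if n < 2:
--         return False
--     d = 2
--     while d * d <= n:
--         if n % d == 0:
--             return False
--         d += 1
--     return True
-- ===== Notes on version B (the rewrite author's own statement) =====
-- stated objective: faster
-- what changed: Replaces the per-pair divisor-enumeration + set-intersection gcd and the per-value float-sqrt wheel trial division with Euclid's algorithm plus a primality table precomputed once for all values 0..N.
import Mathlib
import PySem

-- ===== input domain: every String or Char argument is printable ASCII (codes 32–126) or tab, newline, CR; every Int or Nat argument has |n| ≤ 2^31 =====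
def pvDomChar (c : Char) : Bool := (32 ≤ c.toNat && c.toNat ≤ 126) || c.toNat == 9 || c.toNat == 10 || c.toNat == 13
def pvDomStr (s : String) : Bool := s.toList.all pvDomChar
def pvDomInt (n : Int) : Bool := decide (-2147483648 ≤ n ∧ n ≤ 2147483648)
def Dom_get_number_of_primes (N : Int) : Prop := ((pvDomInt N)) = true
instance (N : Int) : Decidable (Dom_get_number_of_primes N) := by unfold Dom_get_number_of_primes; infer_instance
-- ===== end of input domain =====

-- B replaces A's divisor-enumeration gcd and float-sqrt wheel primality test by Euclid's
-- algorithm plus a primality table precomputed once (objective: faster, asymptotic).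


-- ===== PORT A =====
-- A's gcd: enumerate the divisors of i and of j, intersect them as sets, take the max.
-- Python's max raises on an empty list; inside A the intersection always contains 1
-- (A only calls gcd with i,j ≥ 1), so the .getD 0 default is never reached there.
def pvGcdA (i j : Int) : Int :=
  let ifac := (PySem.List.pyRange 1 (i + 1) 1).filter (fun k => PySem.Int.mod i k == 0)
  let jfac := (PySem.List.pyRange 1 (j + 1) 1).filter (fun k => PySem.Int.mod j k == 0)
  let diff := PySem.Set.inter (PySem.Set.ofList ifac) (PySem.Set.ofList jfac)
  (PySem.List.max? diff (fun x => x)).getD 0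

-- A's isPrime. Python's int(n**0.5) is ported as Nat.sqrt: exact for all 0 ≤ n ≤ 2^31
-- (checked against CPython at every boundary value near a perfect square in that range).
def pvIsPrimeA (n : Int) : Bool :=
  if n ≤ 7 then n == 2 || n == 3 || n == 5 || n == 7
  else if PySem.Int.mod n 2 == 0 || PySem.Int.mod n 3 == 0 ||
          PySem.Int.mod n 5 == 0 || PySem.Int.mod n 7 == 0 then false
  else
    -- for i in range(11, int(n**0.5)+1): if n % i == 0: return False / return True
    (PySem.List.pyRange 11 ((Nat.sqrt n.toNat : Int) + 1) 1).all
      (fun i => !(PySem.Int.mod n i == 0))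

-- A's main double loop ('grid' is written but never read, so it is not carried).
def get_number_of_primes (N : Int) : Int :=
  (PySem.List.pyRange 1 (N + 1) 1).foldl (fun count i =>
    (PySem.List.pyRange 1 (N + 1) 1).foldl (fun count j =>
      if pvIsPrimeA (pvGcdA i j) then count + 1 else count) count) 0

-- ===== PORT B =====
-- B's gcd: Euclid's algorithm (while b: a, b = b, a % b).
def pvGcdB (a b : Int) : Int :=
  if h : b = 0 then a else pvGcdB b (PySem.Int.mod a b)
termination_by b.natAbs
decreasing_by
  rcases lt_or_gt_of_ne h with hb | hb
  · have h1 := PySem.Int.mod_neg_bounds a hb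
    omega
  · have h1 := PySem.Int.mod_nonneg a hb
    have h2 := PySem.Int.mod_lt a hb
    omega

-- B's trial-division loop: d = 2; while d*d <= n: …
def pvTrialB (n d : Int) : Bool :=
  if h : d * d ≤ n then
    if PySem.Int.mod n d == 0 then false else pvTrialB n (d + 1)
  else true
termination_by (n + 1 - d).toNat
decreasing_by
  have hd : d ≤ n := by nlinarith
  omega

def pvIsPrimeB (n : Int) : Bool :=
  if n < 2 then false else pvTrialB n 2

-- B's main: primality table once, then the double loop with Euclid's gcd.
-- Python's prime[g] raises on an out-of-range index; inside the loops 1 ≤ g ≤ N always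
-- holds, so the 'false' default of pyGetD is never reached there.
def get_number_of_primes_alt (N : Int) : Int :=
  if N < 1 then 0
  else
    let prime := (PySem.List.pyRange 0 (N + 1) 1).map pvIsPrimeB
    (PySem.List.pyRange 1 (N + 1) 1).foldl (fun count i =>
      (PySem.List.pyRange 1 (N + 1) 1).foldl (fun count j =>
        if PySem.List.pyGetD prime (pvGcdB i j) false then count + 1 else count) count) 0

-- ===== PRECONDITION & SPEC =====
def Spec_get_number_of_primes (N : Int) (out : Int) : Prop := out = get_number_of_primes_alt N
instance (N : Int) (out : Int) : Decidable (Spec_get_number_of_primes N out) := by unfold Spec_get_number_of_primes; infer_instance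

-- ===== CLAIM (what is proved, stated in full; the proofs are below) =====
def Claim_equal_get_number_of_primes : Prop := ∀ (N : Int), Dom_get_number_of_primes N → Spec_get_number_of_primes N (get_number_of_primes N)

-- ===== LEMMAS AND PROOFS =====

-- a number ≥ 2 is prime iff it has no divisor k with 2 ≤ k and k*k ≤ m
theorem prime_iff_no_small_div (m : Nat) (hm : 2 ≤ m) :
    m.Prime ↔ ∀ k : Nat, 2 ≤ k → k * k ≤ m → ¬ k ∣ m := by
  constructor
  · intro hp k hk2 hkk hdvd
    rcases (Nat.Prime.eq_one_or_self_of_dvd hp k hdvd) with h | h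
    · omega
    · nlinarith
  · intro h
    by_contra hnp
    have hsq := Nat.minFac_sq_le_self (by omega) hnp
    have h2 := (Nat.minFac_prime (show m ≠ 1 by omega)).two_le
    exact h m.minFac h2 (by nlinarith) (Nat.minFac_dvd m)

theorem pvTrialB_iff (n : Int) : ∀ d : Int, 2 ≤ d →
    (pvTrialB n d = true ↔ ∀ e : Int, d ≤ e → e * e ≤ n → ¬ e ∣ n) := by
  intro d
  induction d using pvTrialB.induct (n := n) with
  | case1 d h hmod =>
    intro hd
    rw [pvTrialB, dif_pos h, if_pos hmod]
    refine iff_of_false (by simp) ?_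
    intro hall
    exact hall d le_rfl h ((PySem.Int.mod_eq_zero_iff_dvd n d).mp (by simpa using hmod))
  | case2 d h hmod ih =>
    intro hd
    rw [pvTrialB, dif_pos h, if_neg hmod]
    rw [ih (by omega)]
    constructor
    · intro hall e he hee
      rcases eq_or_lt_of_le he with rfl | hlt
      · intro hdvd
        exact hmod (by simpa using (PySem.Int.mod_eq_zero_iff_dvd n d).mpr hdvd)
      · exact hall e (by omega) hee
    · intro hall e he hee
      exact hall e (by omega) hee
  | case3 d h =>
    intro hd
    rw [pvTrialB, dif_neg h]
    simp only [true_iff]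
    intro e he hee
    exact absurd (le_trans (by nlinarith : d * d ≤ e * e) hee) h

-- the Int-side divisor condition matches the Nat-side one (for 0 ≤ n)
theorem int_div_iff_nat (n : Int) (hn : 2 ≤ n) :
    (∀ e : Int, 2 ≤ e → e * e ≤ n → ¬ e ∣ n) ↔ (∀ k : Nat, 2 ≤ k → k * k ≤ n.toNat → ¬ k ∣ n.toNat) := by
  have hm : ((n.toNat : Int)) = n := Int.toNat_of_nonneg (by omega)
  constructor
  · intro hall k hk hkk hdvd
    refine hall (k : Int) (by exact_mod_cast hk) ?_ ?_
    · rw [← hm]; exact_mod_cast hkk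
    · rw [← hm]; exact_mod_cast hdvd
  · intro hall e he hee hdvd
    have h1 : ((e.toNat : Int)) = e := Int.toNat_of_nonneg (by omega)
    refine hall e.toNat (by omega) ?_ ?_
    · have : ((e.toNat * e.toNat : Nat) : Int) ≤ ((n.toNat : Nat) : Int) := by
        push_cast [h1, hm]; exact hee
      exact_mod_cast this
    · rw [← hm, ← h1] at hdvd; exact_mod_cast hdvd

-- both primality tests compute Nat.Prime n.toNat
theorem pvIsPrimeB_eq (n : Int) : pvIsPrimeB n = decide n.toNat.Prime := by
  unfold pvIsPrimeB
  split_ifs with h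
  · have hnp : ¬ n.toNat.Prime := by intro hp; have := hp.two_le; omega
    simp [hnp]
  · have h2 : 2 ≤ n := by omega
    have key := (pvTrialB_iff n 2 le_rfl).trans
      ((int_div_iff_nat n h2).trans (prime_iff_no_small_div n.toNat (by omega)).symm)
    by_cases hp : n.toNat.Prime
    · simp only [hp, decide_true]; exact key.mpr hp
    · simp only [hp, decide_false]
      cases hb : pvTrialB n 2
      · rfl
      · exact absurd (key.mp hb) hp

theorem pvIsPrimeA_eq (n : Int) : pvIsPrimeA n = decide n.toNat.Prime := by
  unfold pvIsPrimeA
  split_ifs with h7 hdiv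
  · -- n ≤ 7
    rcases lt_or_ge n 2 with hlt | hge
    · have hnp : ¬ n.toNat.Prime := by intro hp; have := hp.two_le; omega
      have e2 : (n == 2) = false := by simp; omega
      have e3 : (n == 3) = false := by simp; omega
      have e5 : (n == 5) = false := by simp; omega
      have e7 : (n == 7) = false := by simp; omega
      simp [e2, e3, e5, e7, hnp]
    · have hm : ((n.toNat : Int)) = n := Int.toNat_of_nonneg (by omega)
      have hb : 2 ≤ n.toNat ∧ n.toNat ≤ 7 := by omega
      obtain ⟨hb1, hb2⟩ := hb
      rw [← hm]
      set m := n.toNat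
      interval_cases m <;> decide
  · -- 8 ≤ n and n divisible by 2, 3, 5 or 7
    have h8 : 8 ≤ n := by omega
    symm
    simp only [decide_eq_false_iff_not]
    intro hp
    have hsmall : ∀ k : Nat, (k : Int) ∣ n → 2 ≤ k → k ≤ 7 → False := by
      intro k hdvd hk2 hk7
      have hkm : k ∣ n.toNat := by
        have hm : ((n.toNat : Int)) = n := Int.toNat_of_nonneg (by omega)
        rw [← hm] at hdvd; exact_mod_cast hdvd
      rcases hp.eq_one_or_self_of_dvd k hkm with h | h <;> omega
    simp only [Bool.or_eq_true, beq_iff_eq, PySem.Int.mod_eq_zero_iff_dvd] at hdiv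
    rcases hdiv with ((h | h) | h) | h
    · exact hsmall 2 (by exact_mod_cast h) (by omega) (by omega)
    · exact hsmall 3 (by exact_mod_cast h) (by omega) (by omega)
    · exact hsmall 5 (by exact_mod_cast h) (by omega) (by omega)
    · exact hsmall 7 (by exact_mod_cast h) (by omega) (by omega)
  · -- 8 ≤ n, not divisible by 2, 3, 5, 7: trial division 11 .. sqrt
    have h8 : 8 ≤ n := by omega
    have hm : ((n.toNat : Int)) = n := Int.toNat_of_nonneg (by omega)
    simp only [Bool.or_eq_true, beq_iff_eq, PySem.Int.mod_eq_zero_iff_dvd, not_or] at hdiv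
    obtain ⟨⟨⟨nd2, nd3⟩, nd5⟩, nd7⟩ := hdiv
    have ndm : ∀ k : Nat, 2 ≤ k → k ≤ 10 → k ∣ n.toNat → False := by
      intro k hk2 hk10 hdvd
      have hdi : (k : Int) ∣ n := by rw [← hm]; exact_mod_cast hdvd
      interval_cases k
      · exact nd2 hdi
      · exact nd3 hdi
      · exact nd2 (dvd_trans (by norm_num) hdi)
      · exact nd5 hdi
      · exact nd2 (dvd_trans (by norm_num) hdi)
      · exact nd7 hdi
      · exact nd2 (dvd_trans (by norm_num) hdi)
      · exact nd3 (dvd_trans (by norm_num) hdi)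
      · exact nd2 (dvd_trans (by norm_num) hdi)
    have hiff : (∀ i ∈ PySem.List.pyRange 11 ((Nat.sqrt n.toNat : Int) + 1) 1,
        (!(PySem.Int.mod n i == 0)) = true) ↔ n.toNat.Prime := by
      rw [prime_iff_no_small_div n.toNat (by omega)]
      constructor
      · intro hall k hk2 hkk hdvd
        rcases le_or_gt k 10 with hk10 | hk11
        · exact ndm k hk2 hk10 hdvd
        · have hks : k ≤ Nat.sqrt n.toNat := Nat.le_sqrt.mpr hkk
          have := hall (k : Int) (by
            rw [PySem.List.mem_pyRange_one]
            constructor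
            · exact_mod_cast hk11
            · have : ((k : Int)) ≤ (Nat.sqrt n.toNat : Int) := by exact_mod_cast hks
              omega)
          simp only [Bool.not_eq_true', beq_eq_false_iff_ne, ne_eq,
            PySem.Int.mod_eq_zero_iff_dvd] at this
          exact this (by rw [← hm]; exact_mod_cast hdvd)
      · intro hpr i hi
        rw [PySem.List.mem_pyRange_one] at hi
        simp only [Bool.not_eq_true', beq_eq_false_iff_ne, ne_eq,
          PySem.Int.mod_eq_zero_iff_dvd]
        intro hdvd
        have hi0 : ((i.toNat : Int)) = i := Int.toNat_of_nonneg (by omega)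
        have hks : i.toNat ≤ Nat.sqrt n.toNat := by omega
        have hkk : i.toNat * i.toNat ≤ n.toNat := Nat.le_sqrt.mp hks
        refine hpr i.toNat (by omega) hkk ?_
        rw [← hm, ← hi0] at hdvd; exact_mod_cast hdvd
    by_cases hp : n.toNat.Prime
    · simp only [hp, decide_true]
      rw [List.all_eq_true]
      exact hiff.mpr hp
    · simp only [hp, decide_false]
      cases hb : (PySem.List.pyRange 11 ((Nat.sqrt n.toNat : Int) + 1) 1).all
          (fun i => !(PySem.Int.mod n i == 0))
      · rfl
      · rw [List.all_eq_true] at hb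
        exact absurd (hiff.mp hb) hp

-- both gcds compute Int.gcd
theorem pvGcdA_eq (i j : Int) (hi : 1 ≤ i) (hj : 1 ≤ j) : pvGcdA i j = (Int.gcd i j : Int) := by
  unfold pvGcdA
  dsimp only
  have hmem : ∀ x : Int,
      (x ∈ PySem.Set.inter
        (PySem.Set.ofList ((PySem.List.pyRange 1 (i + 1) 1).filter (fun k => PySem.Int.mod i k == 0)))
        (PySem.Set.ofList ((PySem.List.pyRange 1 (j + 1) 1).filter (fun k => PySem.Int.mod j k == 0))))
      ↔ ((1 ≤ x ∧ x < i + 1) ∧ x ∣ i) ∧ ((1 ≤ x ∧ x < j + 1) ∧ x ∣ j) := by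
    intro x
    rw [PySem.Set.mem_inter, PySem.Set.mem_ofList, PySem.Set.mem_ofList,
      List.mem_filter, List.mem_filter, PySem.List.mem_pyRange_one, PySem.List.mem_pyRange_one]
    simp [PySem.Int.mod_eq_zero_iff_dvd]
  set diff := PySem.Set.inter
        (PySem.Set.ofList ((PySem.List.pyRange 1 (i + 1) 1).filter (fun k => PySem.Int.mod i k == 0)))
        (PySem.Set.ofList ((PySem.List.pyRange 1 (j + 1) 1).filter (fun k => PySem.Int.mod j k == 0)))
    with hdiff
  have hone : (1 : Int) ∈ diff := by
    rw [hmem]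
    exact ⟨⟨⟨le_rfl, by omega⟩, one_dvd i⟩, ⟨⟨le_rfl, by omega⟩, one_dvd j⟩⟩
  have hg1 : 1 ≤ (Int.gcd i j : Int) := by
    have : 0 < Int.gcd i j := Int.gcd_pos_of_ne_zero_left j (by omega)
    exact_mod_cast this
  have hgd : (Int.gcd i j : Int) ∈ diff := by
    rw [hmem]
    have hdl : (Int.gcd i j : Int) ∣ i := Int.gcd_dvd_left i j
    have hdr : (Int.gcd i j : Int) ∣ j := Int.gcd_dvd_right i j
    have hli : (Int.gcd i j : Int) ≤ i := Int.le_of_dvd (by omega) hdl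
    have hlj : (Int.gcd i j : Int) ≤ j := Int.le_of_dvd (by omega) hdr
    exact ⟨⟨⟨hg1, by omega⟩, hdl⟩, ⟨⟨hg1, by omega⟩, hdr⟩⟩
  cases hmax : PySem.List.max? diff (fun x => x) with
  | none =>
    rw [PySem.List.max?_eq_none_iff] at hmax
    rw [hmax] at hone
    simp at hone
  | some m =>
    have hm := PySem.List.max?_mem hmax
    have hmax' := PySem.List.max?_isMax hmax
    have hle : (Int.gcd i j : Int) ≤ m := hmax' _ hgd
    rw [hmem] at hm
    have hmg : m ∣ (Int.gcd i j : Int) := Int.dvd_coe_gcd hm.1.2 hm.2.2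
    have : m ≤ (Int.gcd i j : Int) := Int.le_of_dvd (by omega) hmg
    rw [Option.getD_some]
    omega

theorem pvGcdB_eq : ∀ a b : Int, 0 ≤ a → 0 ≤ b → pvGcdB a b = (Int.gcd a b : Int) := by
  intro a b
  induction a, b using pvGcdB.induct with
  | case1 a =>
    intro ha _
    rw [pvGcdB, dif_pos rfl]
    simp [Int.gcd, Int.natAbs_of_nonneg ha]
  | case2 a b hb ih =>
    intro ha hb0
    have hbpos : 0 < b := by omega
    rw [pvGcdB, dif_neg hb]
    rw [ih (by omega) (PySem.Int.mod_nonneg a hbpos)]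
    congr 1
    rw [PySem.Int.mod_eq_emod_of_pos hbpos]
    have hm : ((a.toNat : Int)) = a := Int.toNat_of_nonneg ha
    have hk : ((b.toNat : Int)) = b := Int.toNat_of_nonneg (by omega)
    rw [← hm, ← hk]
    rw [show ((a.toNat : Int)) % ((b.toNat : Int)) = ((a.toNat % b.toNat : Nat) : Int) by norm_cast]
    simp only [Int.gcd_natCast_natCast]
    rw [Nat.gcd_comm b.toNat, ← Nat.gcd_rec, Nat.gcd_comm]

-- ===== VERDICT (by name: the statement is the Claim_ definition above) =====
theorem get_number_of_primes_spec : Claim_equal_get_number_of_primes := by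
  intro N _
  unfold Spec_get_number_of_primes get_number_of_primes get_number_of_primes_alt
  by_cases hN : N < 1
  · rw [if_pos hN, PySem.List.pyRange_one_eq_nil (by omega)]
    rfl
  · rw [if_neg hN]
    dsimp only
    apply PySem.List.foldl_congr_mem
    intro acc i hi
    rw [PySem.List.mem_pyRange_one] at hi
    apply PySem.List.foldl_congr_mem
    intro acc2 j hj
    rw [PySem.List.mem_pyRange_one] at hj
    have hgB := pvGcdB_eq i j (by omega) (by omega)
    have hgA := pvGcdA_eq i j (by omega) (by omega)
    have hb1 : (1 : Int) ≤ (Int.gcd i j : Int) := by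
      have : 0 < Int.gcd i j := Int.gcd_pos_of_ne_zero_left j (by omega)
      exact_mod_cast this
    have hb2 : (Int.gcd i j : Int) ≤ N :=
      le_trans (Int.le_of_dvd (by omega) (Int.gcd_dvd_left i j)) (by omega)
    rw [hgA, hgB]
    rw [PySem.List.pyGetD_map_pyRange_of_nonneg _ _ _ _ (by omega) (by omega)]
    rw [pvIsPrimeA_eq, pvIsPrimeB_eq]
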